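-- pv_equiv track=rewrite | github.com/EdgarParra565/player-performance-forecaster | nba_model/run_model.py | _normalize_parlay_stats
-- ===== SOURCE A (Python) =====
-- _PARLAY_STAT_ALIASES = {
--     "pts": "points",
--     "point": "points",
--     "points": "points",
--     "ast": "assists",
--     "assist": "assists",
--     "assists": "assists",
--     "reb": "rebounds",
--     "rebound": "rebounds",
--     "rebounds": "rebounds",
-- }
--
-- def _normalize_parlay_stats(stats: list[str]) -> list[str]:
--     """Normalize stat aliases for parlay legs (e.g., pts -> points)."""
--     normalized = []
--     unknown = []
--     for stat in stats:
--         key = str(stat).strip().lower()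
--         mapped = _PARLAY_STAT_ALIASES.get(key)
--         if mapped:
--             normalized.append(mapped)
--         else:
--             unknown.append(stat)
--     if unknown:
--         raise ValueError(
--             f"Unsupported parlay stat(s): {unknown}. "
--             f"Supported stats: {sorted(set(_PARLAY_STAT_ALIASES.values()))}"
--         )
--     return normalized
-- ===== SOURCE B (Python) =====
-- _VALID_KEYS = frozenset((
--     "pts", "point", "points",
--     "ast", "assist", "assists",
--     "reb", "rebound", "rebounds",
-- ))
--
-- _CANON_BY_INITIAL = {"p": "points", "a": "assists", "r": "rebounds"}
--
--
-- def _normalize_parlay_stats(stats: list[str]) -> list[str]: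
--     """Normalize stat aliases for parlay legs (e.g., pts -> points)."""
--     bad = [s for s in stats if str(s).strip().lower() not in _VALID_KEYS]
--     if bad:
--         raise ValueError(
--             f"Unsupported parlay stat(s): {bad}. "
--             f"Supported stats: {['assists', 'points', 'rebounds']}"
--         )
--     # Every valid alias is a prefix of its canonical stat, so the first
--     # letter alone determines the canonical name.
--     return [_CANON_BY_INITIAL[str(s).strip().lower()[0]] for s in stats]
-- ===== Notes on version B (the rewrite author's own statement) =====
-- stated objective: alternative
-- what changed: Drops the alias dictionary entirely: B validates the stripped lowercased keys against a flat set of nine valid aliases in one filtering pass, then derives each canonical name by classifying the key's first letter (p/a/r), exploiting that every alias is a prefix of its canonical stat.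
import Mathlib
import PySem

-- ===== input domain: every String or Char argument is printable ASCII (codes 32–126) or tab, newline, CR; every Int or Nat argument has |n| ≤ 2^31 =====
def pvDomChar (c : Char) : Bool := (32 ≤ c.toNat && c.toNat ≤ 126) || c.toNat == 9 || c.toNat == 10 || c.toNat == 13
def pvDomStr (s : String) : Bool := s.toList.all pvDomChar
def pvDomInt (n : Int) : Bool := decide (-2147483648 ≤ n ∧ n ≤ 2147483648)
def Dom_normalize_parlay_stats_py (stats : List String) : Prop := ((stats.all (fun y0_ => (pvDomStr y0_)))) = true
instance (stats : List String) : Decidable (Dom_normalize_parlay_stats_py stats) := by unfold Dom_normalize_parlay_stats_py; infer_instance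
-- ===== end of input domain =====

-- ===== PORT A =====
-- A: one loop with a dual (normalized, unknown) accumulator over an alias dict; raises if unknown nonempty.
-- B: no alias dict — validate keys against a flat set, then classify each key by its FIRST letter.  Objective: alternative.
def pvAliases : PySem.Dict String String := PySem.Dict.ofList
  [("pts", "points"), ("point", "points"), ("points", "points"),
   ("ast", "assists"), ("assist", "assists"), ("assists", "assists"),
   ("reb", "rebounds"), ("rebound", "rebounds"), ("rebounds", "rebounds")]

def normalize_parlay_stats_py (stats : List String) : List String :=
  -- for stat in stats: key = stat.strip().lower(); mapped = ALIASES.get(key); if mapped: … else: …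
  -- (every alias value is a nonempty string, so `if mapped` is exactly `mapped is not None`)
  let r := stats.foldl (fun (acc : List String × List String) stat =>
    let key := PySem.Str.lower (PySem.Str.strip stat)
    match PySem.Dict.get? pvAliases key with
    | some mapped => (acc.1 ++ [mapped], acc.2)
    | none => (acc.1, acc.2 ++ [stat])) ([], [])
  -- `if unknown: raise ValueError` — inputs with a nonempty unknown list are outside Pre_
  r.1

-- ===== PORT B =====
def pvValidKeys : PySem.Set String := PySem.Set.ofList
  ["pts", "point", "points", "ast", "assist", "assists", "reb", "rebound", "rebounds"]

def pvCanonByInitial : PySem.Dict String String :=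
  PySem.Dict.ofList [("p", "points"), ("a", "assists"), ("r", "rebounds")]

def normalize_parlay_stats_py_alt (stats : List String) : List String :=
  let bad := stats.filter
    (fun s => !(PySem.Set.contains pvValidKeys (PySem.Str.lower (PySem.Str.strip s))))
  -- `if bad: raise ValueError` — outside Pre_
  if bad = [] then
    -- _CANON_BY_INITIAL[key[0]] : key is valid and nonempty here, so neither lookup can miss
    stats.map (fun s =>
      let key := PySem.Str.lower (PySem.Str.strip s)
      (PySem.Dict.get? pvCanonByInitial
        (String.ofList ((PySem.Str.pyGet? key 0).toList))).getD "")
  else []  -- Python raises here; Pre_ excludes these inputs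

-- ===== PRECONDITION & SPEC =====
-- Pre_ excludes exactly the inputs on which A raises ValueError: some stat whose
-- stripped, lowercased form is not an alias key.
def Pre_normalize_parlay_stats_py (stats : List String) : Prop :=
  ∀ s ∈ stats, PySem.Str.lower (PySem.Str.strip s) ∈
    ["pts", "point", "points", "ast", "assist", "assists", "reb", "rebound", "rebounds"]
instance (stats : List String) : Decidable (Pre_normalize_parlay_stats_py stats) := by
  unfold Pre_normalize_parlay_stats_py; infer_instance
def pvWitness_normalize_parlay_stats_py : List String := ["pts", " AST ", "Rebound"]

def Spec_normalize_parlay_stats_py (stats : List String) (out : List String) : Prop := out = normalize_parlay_stats_py_alt stats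
instance (stats : List String) (out : List String) : Decidable (Spec_normalize_parlay_stats_py stats out) := by unfold Spec_normalize_parlay_stats_py; infer_instance

-- ===== CLAIM (what is proved, stated in full; the proofs are below) =====
def Claim_equal_normalize_parlay_stats_py : Prop := ∀ (stats : List String), Dom_normalize_parlay_stats_py stats → Pre_normalize_parlay_stats_py stats → Spec_normalize_parlay_stats_py stats (normalize_parlay_stats_py stats)

-- ===== LEMMAS AND PROOFS =====
-- For each valid key, A's dict value equals B's first-letter classification.
theorem pvKey_agree {k : String}
    (h : k ∈ ["pts", "point", "points", "ast", "assist", "assists", "reb", "rebound", "rebounds"]) :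
    PySem.Dict.get? pvAliases k =
      some ((PySem.Dict.get? pvCanonByInitial (String.ofList ((PySem.Str.pyGet? k 0).toList))).getD "")
    ∧ PySem.Set.contains pvValidKeys k = true := by
  simp only [List.mem_cons, List.not_mem_nil, or_false] at h
  rcases h with h|h|h|h|h|h|h|h|h <;> rw [h] <;> exact ⟨by decide, by decide⟩

theorem pvFoldA (stats : List String) (acc : List String × List String)
    (h : ∀ s ∈ stats, PySem.Str.lower (PySem.Str.strip s) ∈
      ["pts", "point", "points", "ast", "assist", "assists", "reb", "rebound", "rebounds"]) :
    (stats.foldl (fun (acc : List String × List String) stat =>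
      let key := PySem.Str.lower (PySem.Str.strip stat)
      match PySem.Dict.get? pvAliases key with
      | some mapped => (acc.1 ++ [mapped], acc.2)
      | none => (acc.1, acc.2 ++ [stat])) acc).1
    = acc.1 ++ stats.map (fun s =>
        let key := PySem.Str.lower (PySem.Str.strip s)
        (PySem.Dict.get? pvCanonByInitial
          (String.ofList ((PySem.Str.pyGet? key 0).toList))).getD "") := by
  induction stats generalizing acc with
  | nil => simp
  | cons x xs ih =>
    have hx := (pvKey_agree (h x (List.mem_cons_self ..))).1
    simp only [List.foldl_cons, List.map_cons, hx]
    rw [ih _ (fun s hs => h s (List.mem_cons_of_mem _ hs))]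
    simp

theorem pvBadNil (stats : List String)
    (h : ∀ s ∈ stats, PySem.Str.lower (PySem.Str.strip s) ∈
      ["pts", "point", "points", "ast", "assist", "assists", "reb", "rebound", "rebounds"]) :
    stats.filter
      (fun s => !(PySem.Set.contains pvValidKeys (PySem.Str.lower (PySem.Str.strip s)))) = [] := by
  rw [List.filter_eq_nil_iff]
  intro s hs
  simp only [(pvKey_agree (h s hs)).2, Bool.not_true]
  exact Bool.false_ne_true

-- ===== VERDICT (by name: the statement is the Claim_ definition above) =====
theorem normalize_parlay_stats_py_spec : Claim_equal_normalize_parlay_stats_py := by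
  intro stats _ hpre
  unfold Spec_normalize_parlay_stats_py normalize_parlay_stats_py normalize_parlay_stats_py_alt
  rw [pvFoldA stats ([], []) hpre]
  simp only [if_pos (pvBadNil stats hpre), List.nil_append]
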